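-- pv_equiv track=rewrite | github.com/Thakar-Lab/scBONITA2 | code/rule_determination.py | maximize_incoming_connections
-- ===== SOURCE A (Python) =====
-- def maximize_incoming_connections(min_error_indices, rules, prediction_errors):
--     """
--     For each of the rules with a minimum error, finds the rules with the greatest incoming node connections
--
--     return max_incoming_node_rules, best_rule_indices, best_rule_errors
--     """
--     max_incoming_node_rules = []
--     best_rule_errors = []
--     best_rule_indices = []
--     num_incoming_nodes_list = []
--
--     # Create a list of the number of incoming nodes for each of the minimum rules
--     for index in min_error_indices:
--         num_incoming_nodes = 0
--         if 'A' in rules[index][2]: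
--             num_incoming_nodes += 1
--         if 'B' in rules[index][2]:
--             num_incoming_nodes += 1
--         if 'C' in rules[index][2]:
--             num_incoming_nodes += 1
--         num_incoming_nodes_list.append(num_incoming_nodes)
--
--     # Find the maximum number of incoming nodes
--     max_incoming_nodes = max(num_incoming_nodes_list)
--
--     # Compare to see if the current node has the same number of nodes as the max
--     for i, index in enumerate(min_error_indices):
--
--         num_incoming_nodes = num_incoming_nodes_list[i]
--
--         def append_best_rule(index):
--             max_incoming_node_rules.append(rules[index])
--             best_rule_indices.append(index)
--             best_rule_errors.append(prediction_errors[index])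
--
--         # Find the rules with the same number of rules as the max
--         if max_incoming_nodes == 1 and num_incoming_nodes == 1:
--             append_best_rule(index)
--
--         elif max_incoming_nodes == 2 and num_incoming_nodes == 2:
--             append_best_rule(index)
--
--         elif max_incoming_nodes == 3 and num_incoming_nodes == 3:
--             append_best_rule(index)
--
--     return max_incoming_node_rules, best_rule_indices, best_rule_errors
-- ===== SOURCE B (Python) =====
-- def maximize_incoming_connections(min_error_indices, rules, prediction_errors):
--     """Single pass: track the best incoming-connection count seen so far,
--     resetting the output lists whenever a strictly better count appears."""
--     best_count = 0
--     best_rules, best_indices, best_errors = [], [], []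
--     for index in min_error_indices:
--         s = rules[index][2]
--         c = ('A' in s) + ('B' in s) + ('C' in s)
--         if c > best_count:
--             best_count = c
--             best_rules = [rules[index]]
--             best_indices = [index]
--             best_errors = [prediction_errors[index]]
--         elif c == best_count and c > 0:
--             best_rules.append(rules[index])
--             best_indices.append(index)
--             best_errors.append(prediction_errors[index])
--     return best_rules, best_indices, best_errors
-- ===== Notes on version B (the rewrite author's own statement) =====
-- stated objective: alternative
-- what changed: Replaces A's two-pass scheme (build a counts list, take max(), then re-scan comparing against the max via a three-way if chain) with a single pass that keeps a running best count and resets/extends the three output lists as it goes.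
-- crash fix: On empty min_error_indices A raises ValueError (max() of an empty sequence) while B returns ([], [], []). — e.g. on maximize_incoming_connections([], [], []): A raises ValueError, B returns ([], [], [])
import Mathlib
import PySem

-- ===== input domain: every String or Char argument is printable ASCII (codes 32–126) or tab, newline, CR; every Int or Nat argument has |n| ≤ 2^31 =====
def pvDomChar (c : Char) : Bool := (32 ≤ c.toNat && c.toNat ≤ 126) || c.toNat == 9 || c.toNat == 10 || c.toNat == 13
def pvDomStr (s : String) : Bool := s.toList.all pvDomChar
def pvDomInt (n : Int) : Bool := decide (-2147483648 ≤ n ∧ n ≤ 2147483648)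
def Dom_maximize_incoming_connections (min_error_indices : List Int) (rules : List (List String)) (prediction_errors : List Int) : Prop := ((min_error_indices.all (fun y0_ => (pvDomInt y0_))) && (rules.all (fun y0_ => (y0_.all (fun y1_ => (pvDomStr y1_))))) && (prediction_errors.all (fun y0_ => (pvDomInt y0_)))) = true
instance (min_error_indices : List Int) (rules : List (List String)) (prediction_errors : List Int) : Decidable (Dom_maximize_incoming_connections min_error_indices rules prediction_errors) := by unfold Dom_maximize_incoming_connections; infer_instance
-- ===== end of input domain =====

-- B replaces A's two passes (counts list + max(), then re-scan) with a single pass keeping a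
-- running best count and the three output lists; same return value on Pre_ (objective: alternative).


-- shared helper: rules[index][2]  (total form; Pre_ guarantees both lookups succeed)
def pvThird (rules : List (List String)) (index : Int) : String :=
  (PySem.List.pyGet? ((PySem.List.pyGet? rules index).getD []) 2).getD ""

-- ===== PORT A =====
-- A's per-index count: num_incoming_nodes = 0; three 'if … in …: += 1' steps
def pvNumIncoming (rules : List (List String)) (index : Int) : Int :=
  let s := pvThird rules index
  let n : Int := 0
  let n := if PySem.Str.isIn "A" s then n + 1 else n
  let n := if PySem.Str.isIn "B" s then n + 1 else n
  let n := if PySem.Str.isIn "C" s then n + 1 else n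
  n

-- A's append_best_rule closure acting on the three accumulated lists
def pvAppendBest (rules : List (List String)) (prediction_errors : List Int)
    (st : List (List String) × List Int × List Int) (index : Int) :
    List (List String) × List Int × List Int :=
  (st.1 ++ [(PySem.List.pyGet? rules index).getD []],
   st.2.1 ++ [index],
   st.2.2 ++ [(PySem.List.pyGet? prediction_errors index).getD 0])

def maximize_incoming_connections (min_error_indices : List Int) (rules : List (List String)) (prediction_errors : List Int) : List (List String) × List Int × List Int :=
  -- first loop: build num_incoming_nodes_list
  let counts : List Int :=
    min_error_indices.foldl (fun acc index => acc ++ [pvNumIncoming rules index]) []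
  -- max(num_incoming_nodes_list)  (Pre_ excludes the empty case, where Python raises ValueError)
  let max_incoming_nodes : Int := (PySem.List.max? counts (fun x => x)).getD 0
  -- second loop: for i, index in enumerate(min_error_indices)
  (PySem.List.enumerate min_error_indices).foldl
    (fun st p =>
      let num_incoming_nodes := PySem.List.pyGetD counts p.1 0
      if max_incoming_nodes == 1 && num_incoming_nodes == 1 then pvAppendBest rules prediction_errors st p.2
      else if max_incoming_nodes == 2 && num_incoming_nodes == 2 then pvAppendBest rules prediction_errors st p.2
      else if max_incoming_nodes == 3 && num_incoming_nodes == 3 then pvAppendBest rules prediction_errors st p.2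
      else st)
    ([], [], [])

-- ===== PORT B =====
-- B's per-index count: ('A' in s) + ('B' in s) + ('C' in s)
def pvCount (rules : List (List String)) (index : Int) : Int :=
  (if PySem.Str.isIn "A" (pvThird rules index) then 1 else 0)
  + (if PySem.Str.isIn "B" (pvThird rules index) then 1 else 0)
  + (if PySem.Str.isIn "C" (pvThird rules index) then 1 else 0)

def maximize_incoming_connections_alt (min_error_indices : List Int) (rules : List (List String)) (prediction_errors : List Int) : List (List String) × List Int × List Int :=
  let st :=
    min_error_indices.foldl
      (fun (st : Int × List (List String) × List Int × List Int) index =>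
        let c := pvCount rules index
        if st.1 < c then
          (c, [(PySem.List.pyGet? rules index).getD []], [index],
              [(PySem.List.pyGet? prediction_errors index).getD 0])
        else if c == st.1 && 0 < c then
          (st.1, st.2.1 ++ [(PySem.List.pyGet? rules index).getD []],
                 st.2.2.1 ++ [index],
                 st.2.2.2 ++ [(PySem.List.pyGet? prediction_errors index).getD 0])
        else st)
      (0, [], [], [])
  (st.2.1, st.2.2.1, st.2.2.2)

-- ===== PRECONDITION & SPEC =====
-- Pre_ also requires prediction_errors to be indexable at EVERY listed index, although A only reads
-- it at the selected ones: at an interim-best index B reads it earlier than A, so the corner where a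
-- non-selected index is out of range for prediction_errors (A returns, B raises) is excluded.
def Pre_maximize_incoming_connections (min_error_indices : List Int) (rules : List (List String)) (prediction_errors : List Int) : Prop :=
  min_error_indices ≠ [] ∧
  ∀ i ∈ min_error_indices,
    PySem.Raise.InRange rules.length i ∧
    PySem.Raise.InRange ((PySem.List.pyGet? rules i).getD []).length 2 ∧
    PySem.Raise.InRange prediction_errors.length i
instance (min_error_indices : List Int) (rules : List (List String)) (prediction_errors : List Int) : Decidable (Pre_maximize_incoming_connections min_error_indices rules prediction_errors) := by unfold Pre_maximize_incoming_connections; infer_instance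

def pvWitness_maximize_incoming_connections : List Int × List (List String) × List Int :=
  ([0, 1], [["x", "y", "AB"], ["x", "y", "A"]], [3, 4])

-- On empty min_error_indices A raises ValueError (max() of an empty sequence) while B returns ([], [], []).
def Raises_maximize_incoming_connections (min_error_indices : List Int) (rules : List (List String)) (prediction_errors : List Int) : Prop :=
  min_error_indices = []
instance (min_error_indices : List Int) (rules : List (List String)) (prediction_errors : List Int) : Decidable (Raises_maximize_incoming_connections min_error_indices rules prediction_errors) := by unfold Raises_maximize_incoming_connections; infer_instance
def pvRaiseWitness_maximize_incoming_connections : List Int × List (List String) × List Int := ([], [], [])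
def pvRaiseWitnessOut_maximize_incoming_connections : List (List String) × List Int × List Int := ([], [], [])

def Spec_maximize_incoming_connections (min_error_indices : List Int) (rules : List (List String)) (prediction_errors : List Int) (out : List (List String) × List Int × List Int) : Prop := out = maximize_incoming_connections_alt min_error_indices rules prediction_errors
instance (min_error_indices : List Int) (rules : List (List String)) (prediction_errors : List Int) (out : List (List String) × List Int × List Int) : Decidable (Spec_maximize_incoming_connections min_error_indices rules prediction_errors out) := by unfold Spec_maximize_incoming_connections; infer_instance

-- ===== CLAIM (what is proved, stated in full; the proofs are below) =====
def Claim_equal_maximize_incoming_connections : Prop := ∀ (min_error_indices : List Int) (rules : List (List String)) (prediction_errors : List Int), Dom_maximize_incoming_connections min_error_indices rules prediction_errors → Pre_maximize_incoming_connections min_error_indices rules prediction_errors → Spec_maximize_incoming_connections min_error_indices rules prediction_errors (maximize_incoming_connections min_error_indices rules prediction_errors)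

def Claim_raises_maximize_incoming_connections : Prop := (∀ (min_error_indices : List Int) (rules : List (List String)) (prediction_errors : List Int), Dom_maximize_incoming_connections min_error_indices rules prediction_errors → Raises_maximize_incoming_connections min_error_indices rules prediction_errors → ¬ Pre_maximize_incoming_connections min_error_indices rules prediction_errors) ∧ (Dom_maximize_incoming_connections (pvRaiseWitness_maximize_incoming_connections.1) (pvRaiseWitness_maximize_incoming_connections.2.1) (pvRaiseWitness_maximize_incoming_connections.2.2) ∧ Raises_maximize_incoming_connections (pvRaiseWitness_maximize_incoming_connections.1) (pvRaiseWitness_maximize_incoming_connections.2.1) (pvRaiseWitness_maximize_incoming_connections.2.2) ∧ maximize_incoming_connections_alt (pvRaiseWitness_maximize_incoming_connections.1) (pvRaiseWitness_maximize_incoming_connections.2.1) (pvRaiseWitness_maximize_incoming_connections.2.2) = pvRaiseWitnessOut_maximize_incoming_connections)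

-- ===== LEMMAS AND PROOFS =====

theorem pvNumIncoming_eq_pvCount (rules : List (List String)) (i : Int) :
    pvNumIncoming rules i = pvCount rules i := by
  unfold pvNumIncoming pvCount
  dsimp only
  split_ifs <;> omega

theorem pvCount_nonneg (rules : List (List String)) (i : Int) : 0 ≤ pvCount rules i := by
  unfold pvCount; split_ifs <;> omega

theorem pvCount_le_three (rules : List (List String)) (i : Int) : pvCount rules i ≤ 3 := by
  unfold pvCount; split_ifs <;> omega

-- running maximum of the counts, floor 0
def pvMc (rules : List (List String)) (l : List Int) : Int :=
  l.foldr (fun i a => max (pvCount rules i) a) 0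

theorem pvMc_nonneg (rules : List (List String)) (l : List Int) : 0 ≤ pvMc rules l := by
  induction l with
  | nil => simp [pvMc]
  | cons x t ih => simp only [pvMc, List.foldr_cons] at *; omega

theorem pvMc_le_three (rules : List (List String)) (l : List Int) : pvMc rules l ≤ 3 := by
  induction l with
  | nil => simp [pvMc]
  | cons x t ih =>
    simp only [pvMc, List.foldr_cons] at *
    have := pvCount_le_three rules x; omega

theorem foldl_max_eq (rules : List (List String)) (t : List Int) (a : Int) (ha : 0 ≤ a) :
    List.foldl max a (t.map (pvCount rules)) = max a (pvMc rules t) := by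
  induction t generalizing a with
  | nil => simp [pvMc]; omega
  | cons x s ih =>
    simp only [List.map_cons, List.foldl_cons, pvMc, List.foldr_cons]
    rw [ih (max a (pvCount rules x)) (by have := pvCount_nonneg rules x; omega)]
    simp only [pvMc]
    omega

-- the fold of A's 'append_best_rule' under a boolean selection predicate is filter+map
theorem foldl_appendBest_filter (rules : List (List String)) (pe : List Int)
    (P : Int → Bool) (l : List Int) (r : List (List String)) (ri re : List Int) :
    l.foldl (fun st i => if P i then pvAppendBest rules pe st i else st) (r, ri, re)
    = (r ++ (l.filter P).map (fun i => (PySem.List.pyGet? rules i).getD []),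
       ri ++ l.filter P,
       re ++ (l.filter P).map (fun i => (PySem.List.pyGet? pe i).getD 0)) := by
  induction l generalizing r ri re with
  | nil => simp
  | cons x t ih =>
    simp only [List.foldl_cons, List.filter_cons]
    by_cases h : P x = true
    · rw [if_pos h, ih]
      simp [pvAppendBest, h, List.append_assoc]
    · rw [if_neg h, ih]
      simp [h]

-- characterisation of B's single pass
theorem B_fold (rules : List (List String)) (pe : List Int) (l : List Int)
    (bc : Int) (r : List (List String)) (ri re : List Int) (hbc : 0 ≤ bc) :
    l.foldl
      (fun (st : Int × List (List String) × List Int × List Int) index =>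
        let c := pvCount rules index
        if st.1 < c then
          (c, [(PySem.List.pyGet? rules index).getD []], [index],
              [(PySem.List.pyGet? pe index).getD 0])
        else if c == st.1 && 0 < c then
          (st.1, st.2.1 ++ [(PySem.List.pyGet? rules index).getD []],
                 st.2.2.1 ++ [index],
                 st.2.2.2 ++ [(PySem.List.pyGet? pe index).getD 0])
        else st)
      (bc, r, ri, re)
    = (if pvMc rules l ≤ bc then
        (bc,
         r ++ ((l.filter (fun i => pvCount rules i == bc && 0 < bc)).map (fun i => (PySem.List.pyGet? rules i).getD [])),
         ri ++ l.filter (fun i => pvCount rules i == bc && 0 < bc),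
         re ++ ((l.filter (fun i => pvCount rules i == bc && 0 < bc)).map (fun i => (PySem.List.pyGet? pe i).getD 0)))
      else
        (pvMc rules l,
         ((l.filter (fun i => pvCount rules i == pvMc rules l)).map (fun i => (PySem.List.pyGet? rules i).getD [])),
         l.filter (fun i => pvCount rules i == pvMc rules l),
         ((l.filter (fun i => pvCount rules i == pvMc rules l)).map (fun i => (PySem.List.pyGet? pe i).getD 0)))) := by
  induction l generalizing bc r ri re with
  | nil => simp [pvMc, hbc]
  | cons x t ih =>
    have hMc : pvMc rules (x :: t) = max (pvCount rules x) (pvMc rules t) := rfl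
    have hc0 := pvCount_nonneg rules x
    have hMt0 := pvMc_nonneg rules t
    simp only [List.foldl_cons, hMc]
    set a := pvCount rules x with ha
    set m := pvMc rules t with hm
    by_cases h1 : bc < a
    · rw [if_pos h1, ih a _ _ _ (by omega)]
      by_cases h2 : m ≤ a
      · rw [if_pos h2, if_neg (show ¬ max a m ≤ bc by omega),
            show max a m = a by omega]
        rw [List.filter_congr (fun i _ => show (pvCount rules i == a && decide (0 < a)) = (pvCount rules i == a) by
              simp [show (0:ℤ) < a by omega])]
        simp [List.filter_cons, ← ha]
      · rw [if_neg h2, if_neg (show ¬ max a m ≤ bc by omega),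
            show max a m = m by omega]
        have hx : (pvCount rules x == m) = false := by
          rw [← ha]; simp only [beq_eq_false_iff_ne, ne_eq]; omega
        simp [List.filter_cons, hx]
    · rw [if_neg h1]
      by_cases h2 : a = bc ∧ 0 < bc
      · rw [if_pos (show (a == bc && decide (0 < a)) = true by simp [h2.1]; omega)]
        rw [ih bc _ _ _ hbc]
        by_cases h3 : m ≤ bc
        · rw [if_pos h3, if_pos (show max a m ≤ bc by omega)]
          have hx : (pvCount rules x == bc && decide (0 < bc)) = true := by
            rw [← ha]; simp [h2.1, h2.2]
          simp [List.filter_cons, hx, List.append_assoc]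
        · rw [if_neg h3, if_neg (show ¬ max a m ≤ bc by omega),
              show max a m = m by omega]
          have hx : (pvCount rules x == m) = false := by
            rw [← ha]; simp only [beq_eq_false_iff_ne, ne_eq]; omega
          simp [List.filter_cons, hx]
      · rw [show (a == bc && decide (0 < a)) = false by
              by_cases h : a = bc
              · have hnb : ¬ 0 < bc := fun hb => h2 ⟨h, hb⟩
                simp [h]; omega
              · simp [h]]
        simp only [Bool.false_eq_true, if_false]
        rw [ih bc _ _ _ hbc]
        by_cases h3 : m ≤ bc
        · rw [if_pos h3, if_pos (show max a m ≤ bc by omega)]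
          have hx : (pvCount rules x == bc && decide (0 < bc)) = false := by
            rw [← ha]
            by_cases h : a = bc
            · have hnb : ¬ 0 < bc := fun hb => h2 ⟨h, hb⟩
              simp [h, hnb]
            · simp [h]
          simp [List.filter_cons, hx]
        · rw [if_neg h3, if_neg (show ¬ max a m ≤ bc by omega),
              show max a m = m by omega]
          have hx : (pvCount rules x == m) = false := by
            rw [← ha]; simp only [beq_eq_false_iff_ne, ne_eq]; omega
          simp [List.filter_cons, hx]

-- ===== VERDICT (by name: the statement is the Claim_ definition above) =====
theorem foldl_enumerate_snd {α β : Type} (G : β → α → β) (l : List α) (s : Int) (init : β) :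
    (PySem.List.enumerate l s).foldl (fun st p => G st p.2) init = l.foldl G init := by
  induction l generalizing s init with
  | nil => simp [PySem.List.enumerate_nil]
  | cons x t ih => simp [PySem.List.enumerate_cons, ih]

theorem maximize_incoming_connections_spec : Claim_equal_maximize_incoming_connections := by
  intro mei rules pe _ hpre
  obtain ⟨hne, _⟩ := hpre
  unfold Spec_maximize_incoming_connections
  obtain ⟨x0, t0, rfl⟩ := List.exists_cons_of_ne_nil hne
  simp only [maximize_incoming_connections, maximize_incoming_connections_alt]
  -- A's first loop builds the counts list
  rw [PySem.List.foldl_append_singleton_eq_map]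
  have hfun : pvNumIncoming rules = pvCount rules := funext (pvNumIncoming_eq_pvCount rules)
  simp only [List.nil_append, hfun]
  -- A's max() is the running maximum pvMc
  simp only [List.map_cons, PySem.List.max?_id_cons, Option.getD_some,
    foldl_max_eq rules t0 (pvCount rules x0) (pvCount_nonneg rules x0)]
  have hm : max (pvCount rules x0) (pvMc rules t0) = pvMc rules (x0 :: t0) := rfl
  simp only [hm]
  -- A's second loop: replace the counts[i] lookup by pvCount of the element
  rw [show List.foldl
      (fun (st : List (List String) × List Int × List Int) (p : Int × Int) =>
        if pvMc rules (x0 :: t0) == 1 && PySem.List.pyGetD (pvCount rules x0 :: List.map (pvCount rules) t0) p.1 0 == 1 then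
          pvAppendBest rules pe st p.2
        else if pvMc rules (x0 :: t0) == 2 && PySem.List.pyGetD (pvCount rules x0 :: List.map (pvCount rules) t0) p.1 0 == 2 then
          pvAppendBest rules pe st p.2
        else if pvMc rules (x0 :: t0) == 3 && PySem.List.pyGetD (pvCount rules x0 :: List.map (pvCount rules) t0) p.1 0 == 3 then
          pvAppendBest rules pe st p.2
        else st)
      ([], [], []) (PySem.List.enumerate (x0 :: t0))
    = List.foldl
      (fun (st : List (List String) × List Int × List Int) (p : Int × Int) =>
        if pvMc rules (x0 :: t0) == 1 && (pvCount rules p.2 == 1) then pvAppendBest rules pe st p.2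
        else if pvMc rules (x0 :: t0) == 2 && (pvCount rules p.2 == 2) then pvAppendBest rules pe st p.2
        else if pvMc rules (x0 :: t0) == 3 && (pvCount rules p.2 == 3) then pvAppendBest rules pe st p.2
        else st)
      ([], [], []) (PySem.List.enumerate (x0 :: t0))
    from PySem.List.foldl_congr_mem _ _ _ _ (by
      intro acc p hp
      rw [PySem.List.mem_enumerate_iff] at hp
      obtain ⟨k, hk, rfl⟩ := hp
      have hget : PySem.List.pyGetD (pvCount rules x0 :: List.map (pvCount rules) t0) ((0 : Int) + (k : Int)) 0
          = pvCount rules ((x0 :: t0)[k]) := by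
        rw [zero_add, ← List.map_cons, PySem.List.pyGetD_natCast,
            List.getD_eq_getElem _ _ (by simpa using hk), List.getElem_map]
      dsimp only
      rw [hget])]
  -- drop the enumerate: fold over the indices themselves
  rw [foldl_enumerate_snd
      (fun (st : List (List String) × List Int × List Int) (i : Int) =>
        if pvMc rules (x0 :: t0) == 1 && (pvCount rules i == 1) then pvAppendBest rules pe st i
        else if pvMc rules (x0 :: t0) == 2 && (pvCount rules i == 2) then pvAppendBest rules pe st i
        else if pvMc rules (x0 :: t0) == 3 && (pvCount rules i == 3) then pvAppendBest rules pe st i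
        else st)
      (x0 :: t0) 0 ([], [], [])]
  -- collapse the three-way chain into one boolean test
  rw [show (fun (st : List (List String) × List Int × List Int) (i : Int) =>
        if pvMc rules (x0 :: t0) == 1 && (pvCount rules i == 1) then pvAppendBest rules pe st i
        else if pvMc rules (x0 :: t0) == 2 && (pvCount rules i == 2) then pvAppendBest rules pe st i
        else if pvMc rules (x0 :: t0) == 3 && (pvCount rules i == 3) then pvAppendBest rules pe st i
        else st)
      = (fun (st : List (List String) × List Int × List Int) (i : Int) =>
        if (pvMc rules (x0 :: t0) == 1 && (pvCount rules i == 1)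
            || pvMc rules (x0 :: t0) == 2 && (pvCount rules i == 2)
            || pvMc rules (x0 :: t0) == 3 && (pvCount rules i == 3)) then pvAppendBest rules pe st i
        else st) from funext fun st => funext fun i => by
        by_cases h1 : (pvMc rules (x0 :: t0) == 1 && (pvCount rules i == 1)) = true <;>
        by_cases h2 : (pvMc rules (x0 :: t0) == 2 && (pvCount rules i == 2)) = true <;>
        by_cases h3 : (pvMc rules (x0 :: t0) == 3 && (pvCount rules i == 3)) = true <;>
        simp [h1, h2, h3]]
  rw [foldl_appendBest_filter]
  simp only [List.nil_append]
  -- B's single pass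
  rw [B_fold rules pe (x0 :: t0) 0 [] [] [] le_rfl]
  by_cases hM : pvMc rules (x0 :: t0) ≤ 0
  · have hM0 : pvMc rules (x0 :: t0) = 0 := le_antisymm hM (pvMc_nonneg rules (x0 :: t0))
    rw [if_pos hM]
    have hPf : ∀ i ∈ (x0 :: t0), (pvMc rules (x0 :: t0) == 1 && (pvCount rules i == 1)
            || pvMc rules (x0 :: t0) == 2 && (pvCount rules i == 2)
            || pvMc rules (x0 :: t0) == 3 && (pvCount rules i == 3)) = false := by
      intro i _; rw [hM0]; simp
    have hQf : ∀ i ∈ (x0 :: t0), (pvCount rules i == 0 && decide ((0:ℤ) < 0)) = false := by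
      intro i _; simp
    rw [List.filter_congr hPf, List.filter_congr hQf]
    simp
  · rw [if_neg hM]
    have h3 := pvMc_le_three rules (x0 :: t0)
    have hP : ∀ i ∈ (x0 :: t0), (pvMc rules (x0 :: t0) == 1 && (pvCount rules i == 1)
            || pvMc rules (x0 :: t0) == 2 && (pvCount rules i == 2)
            || pvMc rules (x0 :: t0) == 3 && (pvCount rules i == 3))
          = (pvCount rules i == pvMc rules (x0 :: t0)) := by
      intro i _
      have : pvMc rules (x0 :: t0) = 1 ∨ pvMc rules (x0 :: t0) = 2 ∨ pvMc rules (x0 :: t0) = 3 := by omega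
      rcases this with h | h | h <;> rw [h] <;> simp
    rw [List.filter_congr hP]

@[simp]
theorem maximize_incoming_connections_raises : Claim_raises_maximize_incoming_connections := by
  unfold Claim_raises_maximize_incoming_connections
  constructor
  · intro mei rules pe _ hr hp
    exact hp.1 hr
  · exact ⟨by decide, rfl, by decide⟩
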